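-- pv_equiv track=rewrite | github.com/MpFatemeh/bachelor-final-project | records_analyze.py | extract_term_courses
-- ===== SOURCE A (Python) =====
-- def extract_term_courses(records, fild_map):
--     term_courses = {}
--     for record in records:
--         term_id = record[fild_map["term_id"]]
--         student_id = record[fild_map["student_id"]]
--         course_id = record[fild_map["course_id"]]
--
--         if term_id not in term_courses:
--             term_courses[term_id] = {}
--         if student_id not in term_courses[term_id]:
--             term_courses[term_id][student_id] = []
--
--         term_courses[term_id][student_id].append(course_id)
--
--     for k in term_courses:
--         term_courses[k] = list(term_courses[k].values())
--
--     return term_courses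
-- ===== SOURCE B (Python) =====
-- def extract_term_courses(records, fild_map):
--     # Declarative nested comprehensions: dedup the term column, then per term
--     # dedup the student column and collect each student's courses by rescanning.
--     def dedup(xs):
--         out = []
--         for x in xs:
--             if x not in out:
--                 out.append(x)
--         return out
--     return {
--         term: [
--             [r[fild_map["course_id"]] for r in records
--              if r[fild_map["term_id"]] == term and r[fild_map["student_id"]] == stu]
--             for stu in dedup(r[fild_map["student_id"]] for r in records
--                              if r[fild_map["term_id"]] == term)
--         ]
--         for term in dedup(r[fild_map["term_id"]] for r in records)
--     }
-- ===== Notes on version B (the rewrite author's own statement) =====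
-- stated objective: alternative
-- what changed: B builds no grouping dict at all: it dedups the term column, and for each term dedups the student column and rescans the records with nested filtered comprehensions, trading A's single-pass dict-of-dicts for declarative repeated scans.
import Mathlib
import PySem

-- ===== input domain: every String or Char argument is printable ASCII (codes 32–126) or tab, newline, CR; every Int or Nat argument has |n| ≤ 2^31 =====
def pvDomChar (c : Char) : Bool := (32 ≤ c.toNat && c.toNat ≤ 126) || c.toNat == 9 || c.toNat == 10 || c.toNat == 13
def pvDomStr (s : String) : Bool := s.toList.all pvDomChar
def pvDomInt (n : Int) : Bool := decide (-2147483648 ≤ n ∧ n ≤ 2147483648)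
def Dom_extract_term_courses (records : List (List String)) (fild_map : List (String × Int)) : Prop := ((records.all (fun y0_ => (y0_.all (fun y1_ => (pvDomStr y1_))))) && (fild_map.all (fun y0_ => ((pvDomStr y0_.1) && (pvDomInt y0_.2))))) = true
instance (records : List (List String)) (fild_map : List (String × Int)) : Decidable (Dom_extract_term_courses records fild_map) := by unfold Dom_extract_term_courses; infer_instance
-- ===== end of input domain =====

-- B builds no grouping dict: it dedups the term column and, per term, dedups the student column
-- and rescans the records with nested filtered comprehensions (alternative decomposition, not faster).

-- ===== PORT A =====
def extract_term_courses (records : List (List String)) (fild_map : List (String × Int)) : List (String × List (List String)) :=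
  let fm := PySem.Dict.ofList fild_map
  let term_courses : PySem.Dict String (PySem.Dict String (List String)) :=
    records.foldl (fun term_courses record =>
      let term_id := PySem.List.pyGetD record (fm.getD "term_id" 0) ""
      let student_id := PySem.List.pyGetD record (fm.getD "student_id" 0) ""
      let course_id := PySem.List.pyGetD record (fm.getD "course_id" 0) ""
      let term_courses := if term_courses.contains term_id then term_courses
                          else term_courses.insert term_id PySem.Dict.empty
      let inner := term_courses.getD term_id PySem.Dict.empty
      let inner := if inner.contains student_id then inner else inner.insert student_id []
      term_courses.insert term_id (inner.insert student_id (inner.getD student_id [] ++ [course_id])))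
      PySem.Dict.empty
  -- 'for k in term_courses: term_courses[k] = list(term_courses[k].values())' then return the dict
  term_courses.items.map (fun p => (p.1, p.2.values))

-- ===== PORT B =====
-- Source B's hand-written dedup: 'out = []; for x in xs: if x not in out: out.append(x)'
def pvDedup (xs : List String) : List String :=
  xs.foldl (fun out x => if out.contains x then out else out ++ [x]) []

def extract_term_courses_alt (records : List (List String)) (fild_map : List (String × Int)) : List (String × List (List String)) :=
  let fm := PySem.Dict.ofList fild_map
  let tt := fun r => PySem.List.pyGetD r (fm.getD "term_id" 0) ""
  let ss := fun r => PySem.List.pyGetD r (fm.getD "student_id" 0) ""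
  let cc := fun r => PySem.List.pyGetD r (fm.getD "course_id" 0) ""
  (pvDedup (records.map tt)).map (fun term =>
    (term,
      (pvDedup ((records.filter (fun r => tt r == term)).map ss)).map (fun stu =>
        (records.filter (fun r => tt r == term && ss r == stu)).map cc)))

-- ===== PRECONDITION & SPEC =====
-- Pre_ excludes exactly the inputs where the Python A raises: a record for which one of the three
-- field names is missing from fild_map (KeyError) or its index is out of range (IndexError).
def Pre_extract_term_courses (records : List (List String)) (fild_map : List (String × Int)) : Prop :=
  ∀ r ∈ records,
    ((PySem.Dict.ofList fild_map).contains "term_id" = true ∧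
     (PySem.Dict.ofList fild_map).contains "student_id" = true ∧
     (PySem.Dict.ofList fild_map).contains "course_id" = true) ∧
    PySem.Raise.InRange r.length ((PySem.Dict.ofList fild_map).getD "term_id" 0) ∧
    PySem.Raise.InRange r.length ((PySem.Dict.ofList fild_map).getD "student_id" 0) ∧
    PySem.Raise.InRange r.length ((PySem.Dict.ofList fild_map).getD "course_id" 0)
instance (records : List (List String)) (fild_map : List (String × Int)) : Decidable (Pre_extract_term_courses records fild_map) := by unfold Pre_extract_term_courses; infer_instance

def pvWitness_extract_term_courses : List (List String) × (List (String × Int)) :=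
  ([["t1", "s1", "c1"], ["t1", "s2", "c2"]], [("term_id", 0), ("student_id", 1), ("course_id", 2)])

def Spec_extract_term_courses (records : List (List String)) (fild_map : List (String × Int)) (out : List (String × List (List String))) : Prop := out = extract_term_courses_alt records fild_map
instance (records : List (List String)) (fild_map : List (String × Int)) (out : List (String × List (List String))) : Decidable (Spec_extract_term_courses records fild_map out) := by unfold Spec_extract_term_courses; infer_instance

-- ===== CLAIM (what is proved, stated in full; the proofs are below) =====
def Claim_equal_extract_term_courses : Prop := ∀ (records : List (List String)) (fild_map : List (String × Int)), Dom_extract_term_courses records fild_map → Pre_extract_term_courses records fild_map → Spec_extract_term_courses records fild_map (extract_term_courses records fild_map)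

-- ===== LEMMAS AND PROOFS =====

-- Abbreviations for A's loop, with the three field extractors abstracted out.
def pvAStep (tt ss cc : List String → String)
    (tc : PySem.Dict String (PySem.Dict String (List String))) (r : List String) :
    PySem.Dict String (PySem.Dict String (List String)) :=
  let tc1 := if tc.contains (tt r) then tc else tc.insert (tt r) PySem.Dict.empty
  let inner := tc1.getD (tt r) PySem.Dict.empty
  let inner1 := if inner.contains (ss r) then inner else inner.insert (ss r) []
  tc1.insert (tt r) (inner1.insert (ss r) (inner1.getD (ss r) [] ++ [cc r]))

def pvIStep (ss cc : List String → String)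
    (inner : PySem.Dict String (List String)) (r : List String) : PySem.Dict String (List String) :=
  let inner1 := if inner.contains (ss r) then inner else inner.insert (ss r) []
  inner1.insert (ss r) (inner1.getD (ss r) [] ++ [cc r])

def pvT (fm : PySem.Dict String Int) (r : List String) : String := PySem.List.pyGetD r (fm.getD "term_id" 0) ""
def pvS (fm : PySem.Dict String Int) (r : List String) : String := PySem.List.pyGetD r (fm.getD "student_id" 0) ""
def pvC (fm : PySem.Dict String Int) (r : List String) : String := PySem.List.pyGetD r (fm.getD "course_id" 0) ""

lemma pvA_eq (records : List (List String)) (fild_map : List (String × Int)) :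
    extract_term_courses records fild_map =
      (records.foldl (pvAStep (pvT (PySem.Dict.ofList fild_map)) (pvS (PySem.Dict.ofList fild_map)) (pvC (PySem.Dict.ofList fild_map))) PySem.Dict.empty).items.map
        (fun p => (p.1, p.2.values)) := rfl

lemma pvB_eq (records : List (List String)) (fild_map : List (String × Int)) :
    extract_term_courses_alt records fild_map =
      (PySem.Set.ofList (records.map (pvT (PySem.Dict.ofList fild_map)))).map (fun term =>
        (term,
          (PySem.Set.ofList ((records.filter (fun r => pvT (PySem.Dict.ofList fild_map) r == term)).map (pvS (PySem.Dict.ofList fild_map)))).map (fun stu =>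
            (records.filter (fun r => pvT (PySem.Dict.ofList fild_map) r == term && pvS (PySem.Dict.ofList fild_map) r == stu)).map (pvC (PySem.Dict.ofList fild_map))))) := rfl

-- step facts for A's inner update
lemma pvIStep_keys (ss cc : List String → String) (inner : PySem.Dict String (List String)) (r : List String) :
    (pvIStep ss cc inner r).keys = PySem.Set.add inner.keys (ss r) := by
  unfold pvIStep
  by_cases hc : inner.contains (ss r) = true
  · rw [if_pos hc, PySem.Dict.keys_insert_of_contains _ _ hc,
        PySem.Set.add_of_mem ((PySem.Dict.contains_iff_mem_keys _ _).mp hc)]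
  · rw [if_neg hc]
    rw [PySem.Dict.keys_insert_of_contains _ _ (by simp),
        PySem.Dict.keys_insert_of_not_contains _ _ (by simpa using hc),
        PySem.Set.add_of_not_mem]
    intro hm
    exact hc ((PySem.Dict.contains_iff_mem_keys _ _).mpr hm)

lemma pvIStep_getD (ss cc : List String → String) (inner : PySem.Dict String (List String)) (r : List String) (s0 : String) :
    (pvIStep ss cc inner r).getD s0 [] =
      if s0 = ss r then inner.getD (ss r) [] ++ [cc r] else inner.getD s0 [] := by
  unfold pvIStep
  by_cases hc : inner.contains (ss r) = true
  · simp [hc, PySem.Dict.getD_insert]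
  · simp only [Bool.not_eq_true] at hc
    simp [hc, PySem.Dict.getD_insert, PySem.Dict.getD_of_not_contains _ _ hc]
    split_ifs <;> rfl

-- step facts for A's outer update
lemma pvAStep_keys (tt ss cc : List String → String) (tc : PySem.Dict String (PySem.Dict String (List String))) (r : List String) :
    (pvAStep tt ss cc tc r).keys = PySem.Set.add tc.keys (tt r) := by
  unfold pvAStep
  by_cases hc : tc.contains (tt r) = true
  · rw [if_pos hc, PySem.Dict.keys_insert_of_contains _ _ hc,
        PySem.Set.add_of_mem ((PySem.Dict.contains_iff_mem_keys _ _).mp hc)]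
  · rw [if_neg hc]
    rw [PySem.Dict.keys_insert_of_contains _ _ (by simp),
        PySem.Dict.keys_insert_of_not_contains _ _ (by simpa using hc),
        PySem.Set.add_of_not_mem]
    intro hm
    exact absurd ((PySem.Dict.contains_iff_mem_keys _ _).mpr hm) (by simpa using hc)

lemma pvAStep_getD (tt ss cc : List String → String) (tc : PySem.Dict String (PySem.Dict String (List String))) (r : List String) (t0 : String) :
    (pvAStep tt ss cc tc r).getD t0 PySem.Dict.empty =
      if t0 = tt r then pvIStep ss cc (tc.getD (tt r) PySem.Dict.empty) r
      else tc.getD t0 PySem.Dict.empty := by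
  unfold pvAStep pvIStep
  by_cases hc : tc.contains (tt r) = true
  · simp [hc, PySem.Dict.getD_insert]
  · simp only [Bool.not_eq_true] at hc
    simp [hc, PySem.Dict.getD_insert, PySem.Dict.getD_of_not_contains _ _ hc]
    split_ifs <;> rfl

-- fold facts for A
lemma pvAFold_keys (tt ss cc : List String → String) (l : List (List String)) (d : PySem.Dict String (PySem.Dict String (List String))) :
    (l.foldl (pvAStep tt ss cc) d).keys = PySem.Set.update d.keys (l.map tt) := by
  induction l generalizing d with
  | nil => simp [PySem.Set.update_nil]
  | cons r l ih =>
    rw [List.foldl_cons, ih, List.map_cons, PySem.Set.update_cons, pvAStep_keys]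

lemma pvAFold_getD (tt ss cc : List String → String) (l : List (List String)) (d : PySem.Dict String (PySem.Dict String (List String))) (t0 : String) :
    (l.foldl (pvAStep tt ss cc) d).getD t0 PySem.Dict.empty =
      (l.filter (fun r => tt r == t0)).foldl (pvIStep ss cc) (d.getD t0 PySem.Dict.empty) := by
  induction l generalizing d with
  | nil => rfl
  | cons r l ih =>
    rw [List.foldl_cons, ih, List.filter_cons, pvAStep_getD]
    by_cases heq : tt r = t0
    · simp [heq]
    · simp [heq, Ne.symm heq, beq_iff_eq]

lemma pvIFold_keys (ss cc : List String → String) (l : List (List String)) (d : PySem.Dict String (List String)) :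
    (l.foldl (pvIStep ss cc) d).keys = PySem.Set.update d.keys (l.map ss) := by
  induction l generalizing d with
  | nil => simp [PySem.Set.update_nil]
  | cons r l ih =>
    rw [List.foldl_cons, ih, List.map_cons, PySem.Set.update_cons, pvIStep_keys]

lemma pvIFold_getD (ss cc : List String → String) (l : List (List String)) (d : PySem.Dict String (List String)) (s0 : String) :
    (l.foldl (pvIStep ss cc) d).getD s0 [] =
      d.getD s0 [] ++ (l.filter (fun r => ss r == s0)).map cc := by
  induction l generalizing d with
  | nil => simp
  | cons r l ih =>
    rw [List.foldl_cons, ih, List.filter_cons, pvIStep_getD]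
    by_cases heq : ss r = s0
    · simp [heq]
    · simp [heq, Ne.symm heq, beq_iff_eq]

-- canonical closed form of A's result: exactly B's nested-comprehension shape
lemma pvA_closed (tt ss cc : List String → String) (l : List (List String)) :
    (l.foldl (pvAStep tt ss cc) PySem.Dict.empty).items.map (fun p => (p.1, p.2.values)) =
      (PySem.Set.ofList (l.map tt)).map (fun t0 => (t0,
        (PySem.Set.ofList ((l.filter (fun r => tt r == t0)).map ss)).map (fun s0 =>
          ((l.filter (fun r => tt r == t0)).filter (fun r => ss r == s0)).map cc))) := by
  have hkeys : (l.foldl (pvAStep tt ss cc) PySem.Dict.empty).keys = PySem.Set.ofList (l.map tt) := by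
    rw [pvAFold_keys]
    simp [PySem.Dict.keys_empty, PySem.Set.update_nil_left]
  have hnodup : (l.foldl (pvAStep tt ss cc) PySem.Dict.empty).keys.Nodup := by
    rw [hkeys]; exact PySem.Set.nodup_ofList _
  rw [PySem.Dict.items_eq_map_keys _ hnodup PySem.Dict.empty, hkeys, List.map_map]
  refine List.map_congr_left fun t0 _ => ?_
  have hgetD : (l.foldl (pvAStep tt ss cc) PySem.Dict.empty).getD t0 PySem.Dict.empty =
      (l.filter (fun r => tt r == t0)).foldl (pvIStep ss cc) PySem.Dict.empty := by
    rw [pvAFold_getD]; simp [PySem.Dict.getD_empty]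
  have hikeys : ((l.filter (fun r => tt r == t0)).foldl (pvIStep ss cc) PySem.Dict.empty).keys =
      PySem.Set.ofList ((l.filter (fun r => tt r == t0)).map ss) := by
    rw [pvIFold_keys]
    simp [PySem.Dict.keys_empty, PySem.Set.update_nil_left]
  have hinodup : ((l.filter (fun r => tt r == t0)).foldl (pvIStep ss cc) PySem.Dict.empty).keys.Nodup := by
    rw [hikeys]; exact PySem.Set.nodup_ofList _
  simp only [Function.comp_apply, hgetD]
  rw [PySem.Dict.values_eq_map_keys _ hinodup [], hikeys]
  refine congrArg _ (List.map_congr_left fun s0 _ => ?_)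
  rw [pvIFold_getD]
  simp [PySem.Dict.getD_empty]

lemma pvMain (tt ss cc : List String → String) (l : List (List String)) :
    (l.foldl (pvAStep tt ss cc) PySem.Dict.empty).items.map (fun p => (p.1, p.2.values)) =
      (PySem.Set.ofList (l.map tt)).map (fun term =>
        (term,
          (PySem.Set.ofList ((l.filter (fun r => tt r == term)).map ss)).map (fun stu =>
            (l.filter (fun r => tt r == term && ss r == stu)).map cc))) := by
  rw [pvA_closed]
  refine List.map_congr_left fun t0 _ => ?_
  refine congrArg _ (List.map_congr_left fun s0 _ => ?_)
  rw [List.filter_filter]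
  refine congrArg _ (List.filter_congr fun r _ => ?_)
  exact Bool.and_comm _ _

-- ===== VERDICT (by name: the statement is the Claim_ definition above) =====
theorem extract_term_courses_spec : Claim_equal_extract_term_courses := by
  intro records fild_map _ _
  unfold Spec_extract_term_courses
  rw [pvA_eq, pvB_eq]
  exact pvMain _ _ _ records
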